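-- pv_equiv track=rewrite | github.com/ankitpriyarup/online-judge | kattis/favourable.py | dfs
-- ===== SOURCE A (Python) =====
-- def dfs(graph, memo, good, node):
--     if node in good:
--         return 1
--     if node not in graph:
--         return 0
--     if node in memo:
--         return memo[node]
--
--     ans = 0
--     for child in graph[node]:
--         ans += dfs(graph, memo, good, child)
--
--     memo[node] = ans
--     return ans
-- ===== SOURCE B (Python) =====
-- def dfs(graph, memo, good, node):
--     # Iterative worklist: pop a node; good nodes add 1, absent nodes add 0,
--     # memoized nodes add their stored value, otherwise push the children.
--     # Return value only: unlike A, this never writes into memo.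
--     total = 0
--     stack = [node]
--     while stack:
--         n = stack.pop()
--         if n in good:
--             total += 1
--         elif n not in graph:
--             continue
--         elif n in memo:
--             total += memo[n]
--         else:
--             stack.extend(graph[n])
--     return total
-- ===== Notes on version B (the rewrite author's own statement) =====
-- stated objective: alternative
-- what changed: A's memoizing recursion (which writes computed sums into memo) is replaced by an iterative worklist loop with a single accumulator that pops a node, adds 1 for good nodes, 0 for absent nodes, the stored value for memoized nodes, and otherwise pushes the children; it never writes to memo (return value is unchanged because every value A memoizes equals the memo-free recursive value).
import Mathlib
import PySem

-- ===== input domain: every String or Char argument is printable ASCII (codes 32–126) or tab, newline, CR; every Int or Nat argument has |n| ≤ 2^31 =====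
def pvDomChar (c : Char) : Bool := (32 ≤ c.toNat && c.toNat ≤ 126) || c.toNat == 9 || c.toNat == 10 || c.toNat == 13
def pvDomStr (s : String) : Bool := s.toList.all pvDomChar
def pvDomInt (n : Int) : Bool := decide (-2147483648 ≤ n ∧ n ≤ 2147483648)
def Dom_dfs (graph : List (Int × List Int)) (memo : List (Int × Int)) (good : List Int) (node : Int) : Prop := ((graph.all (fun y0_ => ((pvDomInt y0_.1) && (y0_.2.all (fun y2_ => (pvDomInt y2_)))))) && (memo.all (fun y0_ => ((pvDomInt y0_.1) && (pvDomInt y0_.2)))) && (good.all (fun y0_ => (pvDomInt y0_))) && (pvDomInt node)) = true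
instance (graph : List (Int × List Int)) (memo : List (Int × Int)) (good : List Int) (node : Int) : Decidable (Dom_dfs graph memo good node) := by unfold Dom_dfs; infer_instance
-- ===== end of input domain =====

-- B replaces A's memo-writing recursion by an iterative worklist accumulation (objective: alternative);
-- equivalence is about the RETURN value only: A writes computed sums into `memo`, B never mutates it.

-- ===== PORT A =====
-- total number of child entries in the graph (used only to size the fuel guards)
def dfsL (graph : List (Int × List Int)) : Nat := (graph.flatMap (fun p => p.2)).length

-- literal port of A's recursion, threading the mutated memo; the Nat fuel only makes the
-- recursion total in Lean (under Pre_dfs it is never exhausted)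
def dfsFuelA (graph : List (Int × List Int)) (good : List Int) :
    Nat → PySem.Dict Int Int → Int → Int × PySem.Dict Int Int
  | 0, m, _ => (0, m)
  | Nat.succ f, m, node =>
    if PySem.Set.contains good node then (1, m)
    else
      match (PySem.Dict.mk graph).get? node with
      | none => (0, m)
      | some cs =>
        match m.get? node with
        | some v => (v, m)
        | none =>
          let r := cs.foldl (fun (p : Int × PySem.Dict Int Int) child =>
            let q := dfsFuelA graph good f p.2 child
            (p.1 + q.1, q.2)) (0, m)
          (r.1, r.2.insert node r.1)

def dfs (graph : List (Int × List Int)) (memo : List (Int × Int)) (good : List Int) (node : Int) : Int :=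
  (dfsFuelA graph good (2 + dfsL graph) (PySem.Dict.mk memo) node).1

-- ===== PORT B =====
-- literal port of Source B's while-loop; the list head is the stack top (Python pops from the
-- end and extends with graph[n], hence `cs.reverse ++ rest`); fuel only makes the loop total
def dfsStackB (graph : List (Int × List Int)) (memo : List (Int × Int)) (good : List Int) :
    Nat → Int → List Int → Int
  | 0, total, _ => total
  | Nat.succ _, total, [] => total
  | Nat.succ f, total, n :: rest =>
    if PySem.Set.contains good n then dfsStackB graph memo good f (total + 1) rest
    else
      match (PySem.Dict.mk graph).get? n with
      | none => dfsStackB graph memo good f total rest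
      | some cs =>
        match (PySem.Dict.mk memo).get? n with
        | some v => dfsStackB graph memo good f (total + v) rest
        | none => dfsStackB graph memo good f total (cs.reverse ++ rest)

def dfsFuelB (graph : List (Int × List Int)) : Nat :=
  (((graph.map (fun p => p.2.length)).foldl Nat.max 0) + 1) ^ (2 + dfsL graph)

def dfs_alt (graph : List (Int × List Int)) (memo : List (Int × Int)) (good : List Int) (node : Int) : Int :=
  dfsStackB graph memo good (dfsFuelB graph) 0 [node]

-- ===== PRECONDITION & SPEC =====
-- children a call on n recurses into: none if n is good, absent from graph, or memoized
def dfsSucc (graph : List (Int × List Int)) (memo : List (Int × Int)) (good : List Int) (n : Int) : List Int :=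
  if PySem.Set.contains good n then []
  else
    match (PySem.Dict.mk graph).get? n with
    | none => []
    | some cs =>
      match (PySem.Dict.mk memo).get? n with
      | some _ => []
      | none => cs

def dfsStep (graph : List (Int × List Int)) (memo : List (Int × Int)) (good : List Int) (S : List Int) : List Int :=
  (S.flatMap (dfsSucc graph memo good)).foldl PySem.Set.add S

-- all nodes reachable from `seeds` along dfsSucc edges (the iteration count saturates the closure)
def dfsClosure (graph : List (Int × List Int)) (memo : List (Int × Int)) (good : List Int) (seeds : List Int) : List Int :=
  (dfsStep graph memo good)^[seeds.length + 1 + dfsL graph] (PySem.Set.ofList seeds)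

-- Pre_ excludes exactly the inputs on which Python A raises RecursionError: those where a
-- cycle of expandable nodes (not good, in graph, not memoized) is reachable from `node`.
def Pre_dfs (graph : List (Int × List Int)) (memo : List (Int × Int)) (good : List Int) (node : Int) : Prop :=
  ∀ k ∈ dfsClosure graph memo good [node], k ∉ dfsClosure graph memo good (dfsSucc graph memo good k)

instance (graph : List (Int × List Int)) (memo : List (Int × Int)) (good : List Int) (node : Int) : Decidable (Pre_dfs graph memo good node) := by
  unfold Pre_dfs; infer_instance

def pvWitness_dfs : (List (Int × List Int)) × (List (Int × Int)) × List Int × Int :=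
  ([(0, [1])], [], [1], 0)

def Spec_dfs (graph : List (Int × List Int)) (memo : List (Int × Int)) (good : List Int) (node : Int) (out : Int) : Prop := out = dfs_alt graph memo good node
instance (graph : List (Int × List Int)) (memo : List (Int × Int)) (good : List Int) (node : Int) (out : Int) : Decidable (Spec_dfs graph memo good node out) := by unfold Spec_dfs; infer_instance

-- ===== CLAIM (what is proved, stated in full; the proofs are below) =====
def Claim_equal_dfs : Prop := ∀ (graph : List (Int × List Int)) (memo : List (Int × Int)) (good : List Int) (node : Int), Dom_dfs graph memo good node → Pre_dfs graph memo good node → Spec_dfs graph memo good node (dfs graph memo good node)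

-- ===== LEMMAS AND PROOFS =====

-- edge relation: c is a child a call on n recurses into
def relE (graph : List (Int × List Int)) (memo : List (Int × Int)) (good : List Int) (c n : Int) : Prop :=
  c ∈ dfsSucc graph memo good n

-- the pure value of A's recursion w.r.t. the INITIAL memo, on accessible nodes
def gvalF (graph : List (Int × List Int)) (memo : List (Int × Int)) (good : List Int) :
    (n : Int) → Acc (relE graph memo good) n → Int :=
  WellFounded.fixF (C := fun _ => Int) (fun n ih =>
    if hgd : PySem.Set.contains good n then 1
    else
      match hg : (PySem.Dict.mk graph).get? n with
      | none => 0
      | some cs =>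
        match hm : (PySem.Dict.mk memo).get? n with
        | some v => v
        | none =>
          (cs.attach.map (fun c => ih c.1 (by
            have hng : n ∉ good := fun h => hgd ((PySem.Set.contains_iff _ _).mpr h)
            show c.1 ∈ dfsSucc graph memo good n
            simp [dfsSucc, hng, hg, hm, c.2]))).sum)

noncomputable def gv (graph : List (Int × List Int)) (memo : List (Int × Int)) (good : List Int) (n : Int) : Int :=
  @dite _ _ (Classical.dec _) (fun h : Acc (relE graph memo good) n => gvalF graph memo good n h) (fun _ => 0)

-- size of the pure recursion tree, on accessible nodes
def tszF (graph : List (Int × List Int)) (memo : List (Int × Int)) (good : List Int) :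
    (n : Int) → Acc (relE graph memo good) n → Nat :=
  WellFounded.fixF (C := fun _ => Nat) (fun n ih =>
    1 + ((dfsSucc graph memo good n).attach.map (fun c => ih c.1 c.2)).sum)

noncomputable def ts (graph : List (Int × List Int)) (memo : List (Int × Int)) (good : List Int) (n : Int) : Nat :=
  @dite _ _ (Classical.dec _) (fun h : Acc (relE graph memo good) n => tszF graph memo good n h) (fun _ => 1)


-- ---- basic facts about the add-fold used by dfsStep ----

theorem pvFoldlAdd_append (xs S : List Int) : ∃ t, xs.foldl PySem.Set.add S = S ++ t := by
  induction xs generalizing S with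
  | nil => exact ⟨[], by simp⟩
  | cons x xs ih =>
    by_cases hx : x ∈ S
    · rw [List.foldl_cons, PySem.Set.add_of_mem hx]
      exact ih S
    · rcases ih (S ++ [x]) with ⟨t, ht⟩
      refine ⟨x :: t, ?_⟩
      rw [List.foldl_cons, PySem.Set.add_of_not_mem hx, ht, List.append_assoc]
      rfl

theorem pvMem_foldlAdd (xs S : List Int) (y : Int) :
    y ∈ xs.foldl PySem.Set.add S ↔ y ∈ S ∨ y ∈ xs := by
  induction xs generalizing S with
  | nil => simp
  | cons x xs ih =>
    simp only [List.foldl_cons, ih, PySem.Set.mem_add, List.mem_cons]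
    tauto

theorem pvNodup_foldlAdd (xs S : List Int) (h : S.Nodup) : (xs.foldl PySem.Set.add S).Nodup := by
  induction xs generalizing S with
  | nil => exact h
  | cons x xs ih => exact ih _ (PySem.Set.nodup_add _ _ h)

-- ---- dfsStep / dfsClosure ----

theorem pvSubset_step (graph : List (Int × List Int)) (memo : List (Int × Int)) (good : List Int)
    (S : List Int) : ∀ y ∈ S, y ∈ dfsStep graph memo good S := by
  intro y hy
  exact (pvMem_foldlAdd _ _ _).mpr (Or.inl hy)

theorem pvMem_step (graph : List (Int × List Int)) (memo : List (Int × Int)) (good : List Int)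
    (S : List Int) (y : Int) :
    y ∈ dfsStep graph memo good S ↔ y ∈ S ∨ ∃ x ∈ S, y ∈ dfsSucc graph memo good x := by
  unfold dfsStep
  rw [pvMem_foldlAdd]
  simp [List.mem_flatMap]

def allCh (graph : List (Int × List Int)) : List Int := graph.flatMap (fun p => p.2)

theorem pvSucc_subset_allCh (graph : List (Int × List Int)) (memo : List (Int × Int)) (good : List Int)
    (n y : Int) (h : y ∈ dfsSucc graph memo good n) : y ∈ allCh graph := by
  unfold dfsSucc at h
  split at h
  · simp at h
  · rename_i hg
    split at h
    · simp at h
    · rename_i cs hg2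
      split at h
      · simp at h
      · have hmem := PySem.Dict.mem_items_of_get?_eq_some _ hg2
        exact List.mem_flatMap.mpr ⟨(n, cs), hmem, h⟩

theorem pvNodup_step (graph : List (Int × List Int)) (memo : List (Int × Int)) (good : List Int)
    (S : List Int) (h : S.Nodup) : (dfsStep graph memo good S).Nodup :=
  pvNodup_foldlAdd _ _ h

theorem pvStep_eq_or_lt (graph : List (Int × List Int)) (memo : List (Int × Int)) (good : List Int)
    (S : List Int) : dfsStep graph memo good S = S ∨ S.length < (dfsStep graph memo good S).length := by
  rcases pvFoldlAdd_append (S.flatMap (dfsSucc graph memo good)) S with ⟨t, ht⟩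
  cases t with
  | nil => exact Or.inl (by simpa using ht)
  | cons a t =>
    right
    show S.length < (dfsStep graph memo good S).length
    unfold dfsStep
    rw [ht]
    simp

theorem pvIter_nodup_univ (graph : List (Int × List Int)) (memo : List (Int × Int)) (good : List Int)
    (seeds : List Int) (i : Nat) :
    ((dfsStep graph memo good)^[i] (PySem.Set.ofList seeds)).Nodup ∧
    (∀ y ∈ (dfsStep graph memo good)^[i] (PySem.Set.ofList seeds), y ∈ seeds ++ allCh graph) := by
  induction i with
  | zero =>
    refine ⟨PySem.Set.nodup_ofList _, ?_⟩
    intro y hy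
    exact List.mem_append.mpr (Or.inl ((PySem.Set.mem_ofList _ _).mp hy))
  | succ i ih =>
    rw [Function.iterate_succ_apply']
    refine ⟨pvNodup_step _ _ _ _ ih.1, ?_⟩
    intro y hy
    rcases (pvMem_step _ _ _ _ _).mp hy with h | ⟨x, hx, hsucc⟩
    · exact ih.2 _ h
    · exact List.mem_append.mpr (Or.inr (pvSucc_subset_allCh _ _ _ _ _ hsucc))

theorem pvNodup_length_le (S U : List Int) (hnd : S.Nodup) (hsub : ∀ y ∈ S, y ∈ U) :
    S.length ≤ U.length := by
  calc S.length = S.toFinset.card := (List.toFinset_card_of_nodup hnd).symm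
    _ ≤ U.toFinset.card := Finset.card_le_card (by
        intro y hy
        exact List.mem_toFinset.mpr (hsub _ (List.mem_toFinset.mp hy)))
    _ ≤ U.length := List.toFinset_card_le _

theorem pvClosure_fixed (graph : List (Int × List Int)) (memo : List (Int × Int)) (good : List Int)
    (seeds : List Int) :
    dfsStep graph memo good (dfsClosure graph memo good seeds) = dfsClosure graph memo good seeds := by
  have growth : ∀ i : Nat,
      dfsStep graph memo good ((dfsStep graph memo good)^[i] (PySem.Set.ofList seeds)) =
        (dfsStep graph memo good)^[i] (PySem.Set.ofList seeds) ∨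
      i ≤ ((dfsStep graph memo good)^[i] (PySem.Set.ofList seeds)).length := by
    intro i
    induction i with
    | zero => exact Or.inr (Nat.zero_le _)
    | succ i ih =>
      rcases ih with hfix | hlen
      · left
        rw [Function.iterate_succ_apply', hfix, hfix]
      · rcases pvStep_eq_or_lt graph memo good ((dfsStep graph memo good)^[i] (PySem.Set.ofList seeds)) with hfix | hlt
        · left
          rw [Function.iterate_succ_apply', hfix, hfix]
        · right
          rw [Function.iterate_succ_apply']
          omega
  rcases growth (seeds.length + 1 + dfsL graph) with hfix | hlen
  · exact hfix
  · exfalso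
    have h1 := pvIter_nodup_univ graph memo good seeds (seeds.length + 1 + dfsL graph)
    have h2 := pvNodup_length_le _ _ h1.1 h1.2
    have h3 : (seeds ++ allCh graph).length = seeds.length + dfsL graph := by
      simp [allCh, dfsL]
    omega

theorem pvSeeds_subset_closure (graph : List (Int × List Int)) (memo : List (Int × Int)) (good : List Int)
    (seeds : List Int) : ∀ y ∈ seeds, y ∈ dfsClosure graph memo good seeds := by
  have base : ∀ i : Nat, ∀ y ∈ PySem.Set.ofList seeds,
      y ∈ (dfsStep graph memo good)^[i] (PySem.Set.ofList seeds) := by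
    intro i
    induction i with
    | zero => intro y hy; exact hy
    | succ i ih =>
      intro y hy
      rw [Function.iterate_succ_apply']
      exact pvSubset_step _ _ _ _ _ (ih _ hy)
  intro y hy
  exact base _ _ ((PySem.Set.mem_ofList _ _).mpr hy)

theorem pvClosure_minimal (graph : List (Int × List Int)) (memo : List (Int × Int)) (good : List Int)
    (seeds T : List Int) (hT : dfsStep graph memo good T = T) (hs : ∀ y ∈ seeds, y ∈ T) :
    ∀ y ∈ dfsClosure graph memo good seeds, y ∈ T := by
  have main : ∀ i : Nat, ∀ y ∈ (dfsStep graph memo good)^[i] (PySem.Set.ofList seeds), y ∈ T := by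
    intro i
    induction i with
    | zero => intro y hy; exact hs _ ((PySem.Set.mem_ofList _ _).mp hy)
    | succ i ih =>
      intro y hy
      rw [Function.iterate_succ_apply'] at hy
      rcases (pvMem_step _ _ _ _ _).mp hy with h | ⟨x, hx, hsucc⟩
      · exact ih _ h
      · rw [← hT]
        exact (pvMem_step _ _ _ _ _).mpr (Or.inr ⟨x, ih _ hx, hsucc⟩)
  exact main _

theorem pvClosed_mem (graph : List (Int × List Int)) (memo : List (Int × Int)) (good : List Int)
    (seeds : List Int) (x c : Int) (hx : x ∈ dfsClosure graph memo good seeds)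
    (hc : c ∈ dfsSucc graph memo good x) : c ∈ dfsClosure graph memo good seeds := by
  rw [← pvClosure_fixed graph memo good seeds]
  exact (pvMem_step _ _ _ _ _).mpr (Or.inr ⟨x, hx, hc⟩)


-- ---- the measure, accessibility ----

def muC (graph : List (Int × List Int)) (memo : List (Int × Int)) (good : List Int) (n : Int) : Nat :=
  (dfsClosure graph memo good [n]).toFinset.card

theorem pvMem_closure_self (graph : List (Int × List Int)) (memo : List (Int × Int)) (good : List Int)
    (n : Int) : n ∈ dfsClosure graph memo good [n] :=
  pvSeeds_subset_closure _ _ _ _ _ (by simp)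

theorem pvMu_lt (graph : List (Int × List Int)) (memo : List (Int × Int)) (good : List Int) (node : Int)
    (hpre : Pre_dfs graph memo good node) (n c : Int) (hn : n ∈ dfsClosure graph memo good [node])
    (hc : c ∈ dfsSucc graph memo good n) :
    muC graph memo good c < muC graph memo good n := by
  have hcn : c ∈ dfsClosure graph memo good [n] :=
    pvClosed_mem _ _ _ _ _ _ (pvMem_closure_self _ _ _ _) hc
  have sub1 : ∀ y ∈ dfsClosure graph memo good [c], y ∈ dfsClosure graph memo good [n] :=
    pvClosure_minimal _ _ _ _ _ (pvClosure_fixed _ _ _ _) (by simpa using hcn)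
  have hcs : c ∈ dfsClosure graph memo good (dfsSucc graph memo good n) :=
    pvSeeds_subset_closure _ _ _ _ _ hc
  have sub2 : ∀ y ∈ dfsClosure graph memo good [c], y ∈ dfsClosure graph memo good (dfsSucc graph memo good n) :=
    pvClosure_minimal _ _ _ _ _ (pvClosure_fixed _ _ _ _) (by simpa using hcs)
  have hnotin : n ∉ dfsClosure graph memo good [c] := by
    intro hmem
    exact hpre n hn (sub2 _ hmem)
  apply Finset.card_lt_card
  constructor
  · intro y hy
    exact List.mem_toFinset.mpr (sub1 _ (List.mem_toFinset.mp hy))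
  · intro hsub
    exact hnotin (List.mem_toFinset.mp (hsub (List.mem_toFinset.mpr (pvMem_closure_self _ _ _ _))))

theorem pvAcc (graph : List (Int × List Int)) (memo : List (Int × Int)) (good : List Int) (node : Int)
    (hpre : Pre_dfs graph memo good node) :
    ∀ n ∈ dfsClosure graph memo good [node], Acc (relE graph memo good) n := by
  have main : ∀ k : Nat, ∀ n ∈ dfsClosure graph memo good [node], muC graph memo good n < k →
      Acc (relE graph memo good) n := by
    intro k
    induction k with
    | zero => intro n _ h; omega
    | succ k ih =>
      intro n hn hk
      refine Acc.intro n (fun c hc => ?_)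
      have hlt := pvMu_lt graph memo good node hpre n c hn hc
      exact ih c (pvClosed_mem _ _ _ _ _ _ hn hc) (by omega)
  intro n hn
  exact main (muC graph memo good n + 1) n hn (by omega)

theorem pvAcc_of_succ_nil (graph : List (Int × List Int)) (memo : List (Int × Int)) (good : List Int)
    (n : Int) (h : dfsSucc graph memo good n = []) : Acc (relE graph memo good) n := by
  refine Acc.intro n (fun c hc => ?_)
  rw [relE, h] at hc
  simp at hc

-- ---- unfolding equations for gv ----

theorem pvGv_acc (graph : List (Int × List Int)) (memo : List (Int × Int)) (good : List Int)
    (n : Int) (h : Acc (relE graph memo good) n) :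
    gv graph memo good n = gvalF graph memo good n h := by
  unfold gv
  rw [dif_pos h]

theorem pvGv_good (graph : List (Int × List Int)) (memo : List (Int × Int)) (good : List Int)
    (n : Int) (hgd : PySem.Set.contains good n = true) : gv graph memo good n = 1 := by
  have hmem : n ∈ good := (PySem.Set.contains_iff _ _).mp hgd
  rw [pvGv_acc _ _ _ _ (pvAcc_of_succ_nil _ _ _ _ (by simp [dfsSucc, hmem]))]
  unfold gvalF
  rw [WellFounded.fixF_eq]
  simp [hmem]

theorem pvGv_absent (graph : List (Int × List Int)) (memo : List (Int × Int)) (good : List Int)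
    (n : Int) (hgd : PySem.Set.contains good n = false)
    (hg : (PySem.Dict.mk graph).get? n = none) : gv graph memo good n = 0 := by
  have hmem : n ∉ good := fun hh => by simp at hgd; exact hgd hh
  rw [pvGv_acc _ _ _ _ (pvAcc_of_succ_nil _ _ _ _ (by simp [dfsSucc, hmem, hg]))]
  unfold gvalF
  rw [WellFounded.fixF_eq]
  rw [dif_neg (by simpa using hmem)]
  split
  · rfl
  · rename_i cs heq
    rw [hg] at heq
    cases heq

theorem pvGv_memo (graph : List (Int × List Int)) (memo : List (Int × Int)) (good : List Int)
    (n v : Int) (cs : List Int) (hgd : PySem.Set.contains good n = false)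
    (hg : (PySem.Dict.mk graph).get? n = some cs)
    (hm : (PySem.Dict.mk memo).get? n = some v) : gv graph memo good n = v := by
  have hmem : n ∉ good := fun hh => by simp at hgd; exact hgd hh
  rw [pvGv_acc _ _ _ _ (pvAcc_of_succ_nil _ _ _ _ (by simp [dfsSucc, hmem, hg, hm]))]
  unfold gvalF
  rw [WellFounded.fixF_eq]
  rw [dif_neg (by simpa using hmem)]
  split
  · rename_i heq
    rw [hg] at heq
    cases heq
  · rename_i cs' heq
    rw [hg] at heq
    cases heq
    split
    · rename_i v' heq2
      rw [hm] at heq2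
      cases heq2
      rfl
    · rename_i heq2
      rw [hm] at heq2
      cases heq2

theorem pvGv_expand (graph : List (Int × List Int)) (memo : List (Int × Int)) (good : List Int)
    (n : Int) (cs : List Int) (hacc : Acc (relE graph memo good) n)
    (hgd : PySem.Set.contains good n = false)
    (hg : (PySem.Dict.mk graph).get? n = some cs)
    (hm : (PySem.Dict.mk memo).get? n = none) :
    gv graph memo good n = (cs.map (gv graph memo good)).sum := by
  have hmem : n ∉ good := fun hh => by simp at hgd; exact hgd hh
  rw [pvGv_acc _ _ _ _ hacc]
  unfold gvalF
  rw [WellFounded.fixF_eq]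
  rw [dif_neg (by simpa using hmem)]
  split
  · rename_i heq
    rw [hg] at heq
    cases heq
  · rename_i cs' heq
    rw [hg] at heq
    cases heq
    split
    · rename_i v' heq2
      rw [hm] at heq2
      cases heq2
    · rename_i heq2
      have hsucc : dfsSucc graph memo good n = cs := by simp [dfsSucc, hmem, hg, heq2]
      rw [← List.attach_map_val (l := cs) (f := gv graph memo good)]
      congr 1
      apply List.map_congr_left
      intro c _
      exact (pvGv_acc graph memo good c.1 (hacc.inv (show relE graph memo good c.1 n from hsucc ▸ c.2))).symm

-- ---- unfolding equations for ts ----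

theorem pvTs_acc (graph : List (Int × List Int)) (memo : List (Int × Int)) (good : List Int)
    (n : Int) (h : Acc (relE graph memo good) n) :
    ts graph memo good n = tszF graph memo good n h := by
  unfold ts
  rw [dif_pos h]

theorem pvTs_eq (graph : List (Int × List Int)) (memo : List (Int × Int)) (good : List Int)
    (n : Int) (hacc : Acc (relE graph memo good) n) :
    ts graph memo good n = 1 + ((dfsSucc graph memo good n).map (ts graph memo good)).sum := by
  rw [pvTs_acc _ _ _ _ hacc]
  unfold tszF
  rw [WellFounded.fixF_eq]
  congr 1
  rw [← List.attach_map_val (l := dfsSucc graph memo good n) (f := ts graph memo good)]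
  congr 1
  apply List.map_congr_left
  intro c _
  exact (pvTs_acc graph memo good c.1 (hacc.inv (show relE graph memo good c.1 n from c.2))).symm

theorem pvTs_pos (graph : List (Int × List Int)) (memo : List (Int × Int)) (good : List Int)
    (n : Int) : 1 ≤ ts graph memo good n := by
  by_cases h : Acc (relE graph memo good) n
  · rw [pvTs_eq _ _ _ _ h]
    omega
  · unfold ts
    rw [dif_neg h]


-- ---- A's mutated memo only ever receives correct pure values ----

def pvGE (graph : List (Int × List Int)) (memo : List (Int × Int)) (good : List Int)
    (m : PySem.Dict Int Int) : Prop :=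
  ∀ k : Int, m.get? k = (PySem.Dict.mk memo).get? k ∨
    ((PySem.Dict.mk memo).get? k = none ∧ m.get? k = some (gv graph memo good k))

theorem pvA_main (graph : List (Int × List Int)) (memo : List (Int × Int)) (good : List Int)
    (node : Int) (hpre : Pre_dfs graph memo good node) :
    ∀ (f : Nat) (m : PySem.Dict Int Int) (n : Int),
      n ∈ dfsClosure graph memo good [node] → pvGE graph memo good m →
      muC graph memo good n < f →
      (dfsFuelA graph good f m n).1 = gv graph memo good n ∧
        pvGE graph memo good (dfsFuelA graph good f m n).2 := by
  intro f
  induction f with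
  | zero => intro m n _ _ h; omega
  | succ f ih =>
    intro m n hn hGE hmu
    by_cases hgd : PySem.Set.contains good n = true
    · have hred : dfsFuelA graph good (f + 1) m n = (1, m) := by
        simp [dfsFuelA, (PySem.Set.contains_iff _ _).mp hgd]
      rw [hred]
      exact ⟨(pvGv_good _ _ _ _ hgd).symm, hGE⟩
    · have hgd' : PySem.Set.contains good n = false := by
        revert hgd; cases PySem.Set.contains good n <;> simp
      have hng : n ∉ good := fun hh => by
        rw [(PySem.Set.contains_iff _ _).mpr hh] at hgd'; cases hgd'
      cases hg : (PySem.Dict.mk graph).get? n with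
      | none =>
        have hred : dfsFuelA graph good (f + 1) m n = (0, m) := by simp [dfsFuelA, hng, hg]
        rw [hred]
        exact ⟨(pvGv_absent _ _ _ _ hgd' hg).symm, hGE⟩
      | some cs =>
        cases hm : m.get? n with
        | some v =>
          have hred : dfsFuelA graph good (f + 1) m n = (v, m) := by
            simp [dfsFuelA, hng, hg, hm]
          rw [hred]
          refine ⟨?_, hGE⟩
          rcases hGE n with h | ⟨h0, hv⟩
          · rw [hm] at h
            exact (pvGv_memo _ _ _ _ _ _ hgd' hg h.symm).symm
          · rw [hv] at hm
            exact (Option.some.inj hm).symm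
        | none =>
          have hm0 : (PySem.Dict.mk memo).get? n = none := by
            rcases hGE n with h | ⟨h0, hv⟩
            · rw [hm] at h; exact h.symm
            · rw [hv] at hm; cases hm
          have hsucc : dfsSucc graph memo good n = cs := by simp [dfsSucc, hng, hg, hm0]
          have hacc := pvAcc graph memo good node hpre n hn
          have hchild : ∀ c ∈ cs, c ∈ dfsClosure graph memo good [node] ∧
              muC graph memo good c < f := by
            intro c hc
            have hrel : c ∈ dfsSucc graph memo good n := hsucc ▸ hc
            refine ⟨pvClosed_mem _ _ _ _ _ _ hn hrel, ?_⟩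
            have := pvMu_lt graph memo good node hpre n c hn hrel
            omega
          have hfold : ∀ (cs' : List Int),
              (∀ c ∈ cs', c ∈ dfsClosure graph memo good [node] ∧ muC graph memo good c < f) →
              ∀ (acc : Int) (m' : PySem.Dict Int Int), pvGE graph memo good m' →
              (cs'.foldl (fun (p : Int × PySem.Dict Int Int) child =>
                  let q := dfsFuelA graph good f p.2 child
                  (p.1 + q.1, q.2)) (acc, m')).1 = acc + (cs'.map (gv graph memo good)).sum ∧
                pvGE graph memo good ((cs'.foldl (fun (p : Int × PySem.Dict Int Int) child =>
                  let q := dfsFuelA graph good f p.2 child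
                  (p.1 + q.1, q.2)) (acc, m')).2) := by
            intro cs'
            induction cs' with
            | nil =>
              intro _ acc m' h
              exact ⟨by simp, h⟩
            | cons c cs'' ihc =>
              intro hcs acc m' hGE'
              have hc1 := hcs c (List.mem_cons_self)
              have h1 := ih m' c hc1.1 hGE' hc1.2
              have h2 := ihc (fun d hd => hcs d (List.mem_cons_of_mem _ hd))
                (acc + (dfsFuelA graph good f m' c).1) ((dfsFuelA graph good f m' c).2) h1.2
              simp only [List.foldl_cons]
              refine ⟨?_, h2.2⟩
              rw [h2.1, h1.1]
              simp [List.sum_cons]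
              ring
          have hf := hfold cs hchild 0 m hGE
          have hred : dfsFuelA graph good (f + 1) m n =
              ((cs.foldl (fun (p : Int × PySem.Dict Int Int) child =>
                  let q := dfsFuelA graph good f p.2 child
                  (p.1 + q.1, q.2)) (0, m)).1,
               ((cs.foldl (fun (p : Int × PySem.Dict Int Int) child =>
                  let q := dfsFuelA graph good f p.2 child
                  (p.1 + q.1, q.2)) (0, m)).2).insert n
                 ((cs.foldl (fun (p : Int × PySem.Dict Int Int) child =>
                  let q := dfsFuelA graph good f p.2 child
                  (p.1 + q.1, q.2)) (0, m)).1)) := by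
            simp [dfsFuelA, hng, hg, hm]
          rw [hred]
          have hval : (cs.foldl (fun (p : Int × PySem.Dict Int Int) child =>
              let q := dfsFuelA graph good f p.2 child
              (p.1 + q.1, q.2)) (0, m)).1 = gv graph memo good n := by
            rw [hf.1, pvGv_expand graph memo good n cs hacc hgd' hg hm0]
            simp
          refine ⟨hval, ?_⟩
          intro k
          by_cases hk : k = n
          · subst hk
            rw [PySem.Dict.get?_insert_self]
            exact Or.inr ⟨hm0, by rw [hval]⟩
          · rw [PySem.Dict.get?_insert_of_ne _ _ hk]
            exact hf.2 k

theorem pvMu_le (graph : List (Int × List Int)) (memo : List (Int × Int)) (good : List Int)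
    (n : Int) : muC graph memo good n ≤ 1 + dfsL graph := by
  have h1 := pvIter_nodup_univ graph memo good [n] ([n].length + 1 + dfsL graph)
  calc muC graph memo good n
      ≤ ([n] ++ allCh graph).toFinset.card := by
        apply Finset.card_le_card
        intro y hy
        exact List.mem_toFinset.mpr (h1.2 _ (List.mem_toFinset.mp hy))
    _ ≤ ([n] ++ allCh graph).length := List.toFinset_card_le _
    _ = 1 + dfsL graph := by simp [allCh, dfsL, Nat.add_comm]

theorem pvA_final (graph : List (Int × List Int)) (memo : List (Int × Int)) (good : List Int)
    (node : Int) (hpre : Pre_dfs graph memo good node) :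
    dfs graph memo good node = gv graph memo good node := by
  have h := pvA_main graph memo good node hpre (2 + dfsL graph) (PySem.Dict.mk memo) node
    (pvMem_closure_self _ _ _ _) (fun k => Or.inl rfl)
    (by have := pvMu_le graph memo good node; omega)
  exact h.1

-- ---- the worklist loop of B computes the same pure values ----

theorem pvLe_foldl_max (l : List Nat) : ∀ a : Nat,
    a ≤ l.foldl Nat.max a ∧ ∀ i ∈ l, i ≤ l.foldl Nat.max a := by
  induction l with
  | nil => intro a; simp
  | cons x t ihl =>
    intro a
    have h := ihl (Nat.max a x)
    refine ⟨le_trans (Nat.le_max_left a x) h.1, ?_⟩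
    intro i hi
    rcases List.mem_cons.mp hi with rfl | hi
    · exact le_trans (Nat.le_max_right a i) h.1
    · exact h.2 i hi

theorem pvSucc_len_le (graph : List (Int × List Int)) (memo : List (Int × Int)) (good : List Int)
    (n : Int) : (dfsSucc graph memo good n).length ≤
      (graph.map (fun p => p.2.length)).foldl Nat.max 0 := by
  unfold dfsSucc
  split
  · simp
  · split
    · simp
    · rename_i cs hg
      split
      · simp
      · have hmem := PySem.Dict.mem_items_of_get?_eq_some _ hg
        exact (pvLe_foldl_max _ 0).2 _ (List.mem_map.mpr ⟨(n, cs), hmem, rfl⟩)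

theorem pvTs_le (graph : List (Int × List Int)) (memo : List (Int × Int)) (good : List Int)
    (node : Int) (hpre : Pre_dfs graph memo good node) :
    ∀ n ∈ dfsClosure graph memo good [node],
      ts graph memo good n ≤
        ((graph.map (fun p => p.2.length)).foldl Nat.max 0 + 1) ^ (muC graph memo good n) := by
  have main : ∀ k : Nat, ∀ n ∈ dfsClosure graph memo good [node], muC graph memo good n < k →
      ts graph memo good n ≤
        ((graph.map (fun p => p.2.length)).foldl Nat.max 0 + 1) ^ (muC graph memo good n) := by
    intro k
    induction k with
    | zero => intro n _ h; omega
    | succ k ihk =>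
      intro n hn hk
      set B := (graph.map (fun p => p.2.length)).foldl Nat.max 0 with hB
      have hmu1 : 1 ≤ muC graph memo good n :=
        Finset.card_pos.mpr ⟨n, List.mem_toFinset.mpr (pvMem_closure_self _ _ _ _)⟩
      rw [pvTs_eq _ _ _ _ (pvAcc graph memo good node hpre n hn)]
      have hbound : ∀ t ∈ (dfsSucc graph memo good n).map (ts graph memo good),
          t ≤ (B + 1) ^ (muC graph memo good n - 1) := by
        intro t ht
        rcases List.mem_map.mp ht with ⟨c, hc, rfl⟩
        have hlt := pvMu_lt graph memo good node hpre n c hn hc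
        have hcm := pvClosed_mem _ _ _ _ _ _ hn hc
        calc ts graph memo good c ≤ (B + 1) ^ (muC graph memo good c) :=
              ihk c hcm (by omega)
          _ ≤ (B + 1) ^ (muC graph memo good n - 1) :=
              Nat.pow_le_pow_right (by omega) (by omega)
      have hsum := List.sum_le_card_nsmul _ _ hbound
      rw [List.length_map] at hsum
      have hlen := pvSucc_len_le graph memo good n
      have hp1 : 1 ≤ (B + 1) ^ (muC graph memo good n - 1) := Nat.one_le_pow _ _ (by omega)
      have hpow : (B + 1) ^ (muC graph memo good n) =
          (B + 1) ^ (muC graph memo good n - 1) * (B + 1) := by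
        rw [← pow_succ]
        congr 1
        omega
      rw [hpow]
      have h2 : (dfsSucc graph memo good n).length • ((B + 1) ^ (muC graph memo good n - 1)) =
          (dfsSucc graph memo good n).length * ((B + 1) ^ (muC graph memo good n - 1)) :=
        smul_eq_mul _ _
      rw [h2] at hsum
      have h3 : (dfsSucc graph memo good n).length * ((B + 1) ^ (muC graph memo good n - 1)) ≤
          B * ((B + 1) ^ (muC graph memo good n - 1)) :=
        Nat.mul_le_mul_right _ hlen
      nlinarith [hsum, h3, hp1]
  intro n hn
  exact main (muC graph memo good n + 1) n hn (by omega)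

theorem pvB_main (graph : List (Int × List Int)) (memo : List (Int × Int)) (good : List Int)
    (node : Int) (hpre : Pre_dfs graph memo good node) :
    ∀ (f : Nat) (total : Int) (stack : List Int),
      (∀ k ∈ stack, k ∈ dfsClosure graph memo good [node]) →
      (stack.map (ts graph memo good)).sum ≤ f →
      dfsStackB graph memo good f total stack = total + (stack.map (gv graph memo good)).sum := by
  intro f
  induction f with
  | zero =>
    intro total stack hmem hf
    cases stack with
    | nil => simp [dfsStackB]
    | cons n rest =>
      exfalso
      simp only [List.map_cons, List.sum_cons] at hf
      have := pvTs_pos graph memo good n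
      omega
  | succ f ihf =>
    intro total stack hmem hf
    cases stack with
    | nil => simp [dfsStackB]
    | cons n rest =>
      have hn := hmem n List.mem_cons_self
      have hrest : ∀ k ∈ rest, k ∈ dfsClosure graph memo good [node] :=
        fun k hk => hmem k (List.mem_cons_of_mem _ hk)
      have hts := pvTs_pos graph memo good n
      simp only [List.map_cons, List.sum_cons] at hf ⊢
      by_cases hgd : PySem.Set.contains good n = true
      · have hrec := ihf (total + 1) rest hrest (by omega)
        have hred : dfsStackB graph memo good (f + 1) total (n :: rest) =
            dfsStackB graph memo good f (total + 1) rest := by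
          simp [dfsStackB, (PySem.Set.contains_iff _ _).mp hgd]
        rw [hred, hrec, pvGv_good _ _ _ _ hgd]
        ring
      · have hgd' : PySem.Set.contains good n = false := by
          revert hgd; cases PySem.Set.contains good n <;> simp
        have hng : n ∉ good := fun hh => by
          rw [(PySem.Set.contains_iff _ _).mpr hh] at hgd'; cases hgd'
        cases hg : (PySem.Dict.mk graph).get? n with
        | none =>
          have hrec := ihf total rest hrest (by omega)
          have hred : dfsStackB graph memo good (f + 1) total (n :: rest) =
              dfsStackB graph memo good f total rest := by simp [dfsStackB, hng, hg]
          rw [hred, hrec, pvGv_absent _ _ _ _ hgd' hg]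
          ring
        | some cs =>
          cases hm : (PySem.Dict.mk memo).get? n with
          | some v =>
            have hrec := ihf (total + v) rest hrest (by omega)
            have hred : dfsStackB graph memo good (f + 1) total (n :: rest) =
                dfsStackB graph memo good f (total + v) rest := by
              simp [dfsStackB, hng, hg, hm]
            rw [hred, hrec, pvGv_memo _ _ _ _ _ _ hgd' hg hm]
            ring
          | none =>
            have hsucc : dfsSucc graph memo good n = cs := by simp [dfsSucc, hng, hg, hm]
            have hacc := pvAcc graph memo good node hpre n hn
            have hmem' : ∀ k ∈ cs.reverse ++ rest, k ∈ dfsClosure graph memo good [node] := by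
              intro k hk
              rcases List.mem_append.mp hk with hk | hk
              · exact pvClosed_mem _ _ _ _ _ _ hn (hsucc ▸ (List.mem_reverse.mp hk))
              · exact hrest k hk
            have htseq := pvTs_eq _ _ _ _ hacc
            rw [hsucc] at htseq
            have hfuel : ((cs.reverse ++ rest).map (ts graph memo good)).sum ≤ f := by
              rw [List.map_append, List.sum_append, List.map_reverse, List.sum_reverse]
              omega
            have hrec := ihf total (cs.reverse ++ rest) hmem' hfuel
            have hred : dfsStackB graph memo good (f + 1) total (n :: rest) =
                dfsStackB graph memo good f total (cs.reverse ++ rest) := by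
              simp [dfsStackB, hng, hg, hm]
            rw [hred, hrec, pvGv_expand graph memo good n cs hacc hgd' hg hm,
              List.map_append, List.sum_append, List.map_reverse, List.sum_reverse]

theorem pvB_final (graph : List (Int × List Int)) (memo : List (Int × Int)) (good : List Int)
    (node : Int) (hpre : Pre_dfs graph memo good node) :
    dfs_alt graph memo good node = gv graph memo good node := by
  unfold dfs_alt
  have hfuel : ([node].map (ts graph memo good)).sum ≤ dfsFuelB graph := by
    simp only [List.map_cons, List.map_nil, List.sum_cons, List.sum_nil, add_zero]
    calc ts graph memo good node
        ≤ ((graph.map (fun p => p.2.length)).foldl Nat.max 0 + 1) ^ (muC graph memo good node) :=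
          pvTs_le graph memo good node hpre node (pvMem_closure_self _ _ _ _)
      _ ≤ dfsFuelB graph := by
          unfold dfsFuelB
          apply Nat.pow_le_pow_right (by omega)
          have := pvMu_le graph memo good node
          omega
  have h := pvB_main graph memo good node hpre (dfsFuelB graph) 0 [node]
    (by intro k hk; simp at hk; subst hk; exact pvMem_closure_self _ _ _ _) hfuel
  rw [h]
  simp

-- ===== VERDICT (by name: the statement is the Claim_ definition above) =====
theorem dfs_spec : Claim_equal_dfs := by
  intro graph memo good node _ hpre
  unfold Spec_dfs
  rw [pvA_final graph memo good node hpre, pvB_final graph memo good node hpre]
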